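-- pv_equiv track=rewrite | github.com/Juanpgm/proyectos_cali_alcaldia_etl | auth_system/utils.py | permissions_to_dict
-- ===== SOURCE A (Python) =====
-- from typing import Dict, List, Optional
--
-- def format_permission(permission: str) -> Dict[str, str]:
--     """
--     Parsea un permiso en sus componentes.
--
--     Ejemplo: "write:proyectos:own_centro" ->
--              {"action": "write", "resource": "proyectos", "scope": "own_centro"}
--
--     Args:
--         permission: Permiso a parsear
--
--     Returns:
--         Dict con componentes del permiso
--     """
--     parts = permission.split(':')
--
--     result = {
--         "action": parts[0] if len(parts) > 0 else "",
--         "resource": parts[1] if len(parts) > 1 else "",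
--         "scope": parts[2] if len(parts) > 2 else "all"
--     }
--
--     return result
--
-- def permissions_to_dict(permissions: List[str]) -> Dict[str, List[str]]:
--     """
--     Agrupa permisos por recurso.
--
--     Args:
--         permissions: Lista de permisos
--
--     Returns:
--         Dict agrupado por recurso
--     """
--     grouped = {}
--
--     for permission in permissions:
--         parsed = format_permission(permission)
--         resource = parsed['resource']
--
--         if resource not in grouped:
--             grouped[resource] = []
--
--         grouped[resource].append(permission)
--
--     return grouped
-- ===== SOURCE B (Python) =====
-- def permissions_to_dict(permissions):
--     def res(p):
--         parts = p.split(':')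
--         return parts[1] if len(parts) > 1 else ''
--     resources = list(dict.fromkeys(res(p) for p in permissions))
--     return {r: [p for p in permissions if res(p) == r] for r in resources}
-- ===== Notes on version B (the rewrite author's own statement) =====
-- stated objective: idiomatic
-- what changed: Replaces the incremental dict-with-membership-test accumulation by a two-phase comprehension: first the distinct resources in first-occurrence order (dict.fromkeys), then one filtering comprehension per resource.
import Mathlib
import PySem

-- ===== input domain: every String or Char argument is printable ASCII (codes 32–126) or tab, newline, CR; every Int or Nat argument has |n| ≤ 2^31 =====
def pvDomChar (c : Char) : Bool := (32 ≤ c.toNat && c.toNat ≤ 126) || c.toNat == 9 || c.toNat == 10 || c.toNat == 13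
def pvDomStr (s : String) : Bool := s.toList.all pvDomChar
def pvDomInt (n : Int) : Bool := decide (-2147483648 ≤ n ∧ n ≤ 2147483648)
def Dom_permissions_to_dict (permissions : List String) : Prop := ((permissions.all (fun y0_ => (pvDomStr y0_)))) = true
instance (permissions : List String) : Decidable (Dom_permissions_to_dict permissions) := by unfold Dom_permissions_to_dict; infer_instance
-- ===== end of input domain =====

-- B groups by a direct key function in two comprehensions (distinct resources, then a filter per resource)
-- instead of A's incremental dict accumulation; objective: more idiomatic, same return value.

-- ===== PORT A =====
-- format_permission: builds the 3-field dict; split(':') always yields ≥ 1 part (split? is some for sep ≠ "")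
def format_permission (permission : String) : PySem.Dict String String :=
  let parts := (PySem.Str.split? permission ":").getD []
  (((PySem.Dict.empty.insert "action" (if parts.length > 0 then (PySem.List.pyGet? parts 0).getD "" else "")).insert
      "resource" (if parts.length > 1 then (PySem.List.pyGet? parts 1).getD "" else "")).insert
      "scope" (if parts.length > 2 then (PySem.List.pyGet? parts 2).getD "" else "all"))

def permissions_to_dict (permissions : List String) : List (String × List String) :=
  (permissions.foldl (fun grouped permission =>
    let parsed := format_permission permission
    -- parsed['resource']: the key is always present, so the lookup cannot raise; getD "" matches it exactly
    let resource := (parsed.get? "resource").getD ""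
    let grouped := if grouped.contains resource then grouped else grouped.insert resource ([] : List String)
    grouped.modify resource [] (fun l => l ++ [permission])) PySem.Dict.empty).items

-- ===== PORT B =====
def pvResKey (p : String) : String :=
  let parts := (PySem.Str.split? p ":").getD []
  if parts.length > 1 then (PySem.List.pyGet? parts 1).getD "" else ""

def permissions_to_dict_alt (permissions : List String) : List (String × List String) :=
  let resources := PySem.List.dedup (permissions.map pvResKey)
  resources.map (fun r => (r, permissions.filter (fun p => pvResKey p == r)))

-- ===== PRECONDITION & SPEC =====
def Spec_permissions_to_dict (permissions : List String) (out : List (String × List String)) : Prop := out = permissions_to_dict_alt permissions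
instance (permissions : List String) (out : List (String × List String)) : Decidable (Spec_permissions_to_dict permissions out) := by unfold Spec_permissions_to_dict; infer_instance

-- ===== CLAIM (what is proved, stated in full; the proofs are below) =====
def Claim_equal_permissions_to_dict : Prop := ∀ (permissions : List String), Dom_permissions_to_dict permissions → Spec_permissions_to_dict permissions (permissions_to_dict permissions)

-- ===== LEMMAS AND PROOFS =====

-- The 'resource' field A extracts is exactly B's key function.
theorem resource_eq (p : String) :
    ((format_permission p).get? "resource").getD "" = pvResKey p := by
  simp [format_permission, pvResKey, PySem.Dict.get?_insert]

-- A's insert-if-absent followed by append equals a single modify-with-default.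
theorem step_eq_modify (d : PySem.Dict String (List String)) (r : String) (p : String) :
    ((if d.contains r then d else d.insert r ([] : List String)).modify r [] (fun l => l ++ [p]))
      = d.modify r [] (fun l => l ++ [p]) := by
  by_cases h : d.contains r
  · simp [h]
  · have h0 : d.getD r [] = [] :=
      PySem.Dict.getD_of_not_contains d [] (by simpa using h)
    simp [h, PySem.Dict.modify, PySem.Dict.getD_insert_self, PySem.Dict.insert_insert_self, h0]

theorem foldl_eq_modify_fold (permissions : List String) (d : PySem.Dict String (List String)) :
    permissions.foldl (fun grouped permission =>
      let parsed := format_permission permission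
      let resource := (parsed.get? "resource").getD ""
      let grouped := if grouped.contains resource then grouped else grouped.insert resource ([] : List String)
      grouped.modify resource [] (fun l => l ++ [permission])) d
    = permissions.foldl (fun g p => g.modify (pvResKey p) [] (fun l => l ++ [p])) d := by
  induction permissions generalizing d with
  | nil => rfl
  | cons p ps ih =>
    simp only [List.foldl_cons]
    rw [show ∀ g : PySem.Dict String (List String),
        (let parsed := format_permission p
         let resource := (parsed.get? "resource").getD ""
         let g' := if g.contains resource then g else g.insert resource ([] : List String)
         g'.modify resource [] (fun l => l ++ [p])) = g.modify (pvResKey p) [] (fun l => l ++ [p])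
      from fun g => by simp only [resource_eq]; exact step_eq_modify g (pvResKey p) p]
    exact ih _

theorem permissions_to_dict_eq_alt (permissions : List String) :
    permissions_to_dict permissions = permissions_to_dict_alt permissions := by
  unfold permissions_to_dict permissions_to_dict_alt
  rw [foldl_eq_modify_fold]
  have hmap : permissions.foldl (fun g p => g.modify (pvResKey p) [] (fun l => l ++ [p])) PySem.Dict.empty
      = (permissions.map (fun p => (pvResKey p, p))).foldl
          (fun g q => g.modify q.1 [] (fun l => l ++ [q.2])) PySem.Dict.empty := by
    rw [List.foldl_map]
  have hkeys : (permissions.foldl (fun g p => g.modify (pvResKey p) [] (fun l => l ++ [p])) PySem.Dict.empty).keys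
      = PySem.Set.ofList (permissions.map pvResKey) := by
    rw [PySem.Dict.keys_foldl_modify_key permissions pvResKey [] (fun _ p => fun l => l ++ [p])]
    simp [PySem.Set.update, PySem.Set.ofList_eq_foldl, PySem.Dict.keys_empty]
  have hnodup : (permissions.foldl (fun g p => g.modify (pvResKey p) [] (fun l => l ++ [p])) PySem.Dict.empty).keys.Nodup :=
    PySem.Dict.nodup_keys_foldl_modify_key permissions pvResKey [] (fun _ p => fun l => l ++ [p])
      PySem.Dict.empty (by simp [PySem.Dict.keys_empty])
  have hgetD : ∀ r : String, (permissions.foldl (fun g p => g.modify (pvResKey p) [] (fun l => l ++ [p])) PySem.Dict.empty).getD r []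
      = permissions.filter (fun p => pvResKey p == r) := by
    intro r
    rw [hmap, PySem.Dict.getD_foldl_modify_append]
    simp [List.filter_map, Function.comp_def, PySem.Dict.getD_empty]
  rw [PySem.Dict.items_eq_map_keys _ hnodup [], hkeys, PySem.List.dedup_eq_ofList]
  exact List.map_congr_left (fun k _ => by rw [hgetD k])

-- ===== VERDICT (by name: the statement is the Claim_ definition above) =====
theorem permissions_to_dict_spec : Claim_equal_permissions_to_dict := by
  intro permissions _
  unfold Spec_permissions_to_dict
  exact permissions_to_dict_eq_alt permissions
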